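-- pv_equiv track=rewrite | github.com/subrotonpi/clone_transcompiler | storage/data_transpiled/at_coder/arc088/B/3856244.py | center_length
-- ===== SOURCE A (Python) =====
-- def center_length ( s ) :
--     import string
--     import sys
--     class Main ( object ) :
--         def __init__ ( self ) :
--             self.s = s
--             self.center = ''
--             self.length = 2
--             left , right = N // 2 - 2 , N // 2 + 1
--             while left >= 0 and s [ left ] == center and s [ right ] == center :
--                 left -= 1
--                 right += 1
--                 length += 2
--             return length
--         def __call__ ( self ) :
--             with open ( self.s ) as sc :
--                 S = sc.read ( )
--     def main ( ) :
--         return Main ( )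
--     N = len ( s )
--     if N % 2 == 0 :
--         if s [ N // 2 ] != s [ N // 2 - 1 ] :
--             return 0
--         center = s [ N // 2 ]
--         length = 2
--         left , right = N // 2 - 2 , N // 2 + 1
--         while left >= 0 and s [ left ] == center and s [ right ] == center :
--             left -= 1
--             right += 1
--             length += 2
--         return length
--     else :
--         center = s [ N // 2 ]
--         left , right = N // 2 - 1 , N // 2 + 1
--         length = 1
--         while left >= 0 and s [ left ] == center and s [ right ] == center :
--             left -= 1
--             right += 1
--             length += 2
--         return length
-- ===== SOURCE B (Python) =====
-- def center_length(s):
--     N = len(s)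
--     c = s[N // 2]
--     if N % 2 == 0:
--         if s[N // 2 - 1] != c:
--             return 0
--         base, lpref = 2, s[:N // 2 - 1]
--     else:
--         base, lpref = 1, s[:N // 2]
--     L = 0
--     for ch in reversed(lpref):
--         if ch != c:
--             break
--         L += 1
--     R = 0
--     for ch in s[N // 2 + 1:]:
--         if ch != c:
--             break
--         R += 1
--     return base + 2 * min(L, R)
-- ===== Notes on version B (the rewrite author's own statement) =====
-- stated objective: simpler
-- what changed: Replaces A's lockstep two-pointer while-loop with two independent run counts (leftward in the prefix, rightward in the suffix) combined as base + 2*min(L, R).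
import Mathlib
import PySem

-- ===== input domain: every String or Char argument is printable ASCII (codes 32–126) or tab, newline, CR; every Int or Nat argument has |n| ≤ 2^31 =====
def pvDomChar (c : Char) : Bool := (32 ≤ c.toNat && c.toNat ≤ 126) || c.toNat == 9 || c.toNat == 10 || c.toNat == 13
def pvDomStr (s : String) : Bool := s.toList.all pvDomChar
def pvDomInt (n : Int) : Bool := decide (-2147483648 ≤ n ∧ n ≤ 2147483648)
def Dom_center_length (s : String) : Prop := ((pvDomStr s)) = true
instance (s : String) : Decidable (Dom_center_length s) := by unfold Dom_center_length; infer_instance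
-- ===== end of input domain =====

-- B replaces A's lockstep two-pointer while-loop with two independent run counts; objective: simpler.

-- ===== PORT A =====
-- A's while-loop: 'while left >= 0 and s[left] == center and s[right] == center: left -= 1; right += 1; length += 2'.
-- Fuel is (left+1).toNat, enough since each iteration needs left ≥ 0 and decrements left.
def aLoop (cs : List Char) (center : Char) : Nat → Int → Int → Int → Int
  | 0, _, _, length => length
  | fuel + 1, left, right, length =>
    if left ≥ 0 ∧ PySem.List.pyGet? cs left = some center ∧ PySem.List.pyGet? cs right = some center
    then aLoop cs center fuel (left - 1) (right + 1) (length + 2)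
    else length

def centerA (cs : List Char) (N : Int) : Int :=
  if PySem.Int.mod N 2 = 0 then
    -- s[N//2], s[N//2 - 1]: none = IndexError (excluded by Pre_)
    match PySem.List.pyGet? cs (PySem.Int.floordiv N 2), PySem.List.pyGet? cs (PySem.Int.floordiv N 2 - 1) with
    | some a, some b =>
      if a ≠ b then 0
      else aLoop cs a (PySem.Int.floordiv N 2 - 2 + 1).toNat (PySem.Int.floordiv N 2 - 2) (PySem.Int.floordiv N 2 + 1) 2
    | _, _ => 0
  else
    match PySem.List.pyGet? cs (PySem.Int.floordiv N 2) with
    | some center => aLoop cs center (PySem.Int.floordiv N 2 - 1 + 1).toNat (PySem.Int.floordiv N 2 - 1) (PySem.Int.floordiv N 2 + 1) 1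
    | none => 0

def center_length (s : String) : Int := centerA s.toList s.toList.length

-- ===== PORT B =====
-- 'for ch in t: if ch != c: break; cnt += 1' — length of the initial run of c in t.
def runCount (c : Char) : List Char → Int
  | [] => 0
  | x :: xs => if x ≠ c then 0 else 1 + runCount c xs

def centerB (cs : List Char) (N : Int) : Int :=
  match PySem.List.pyGet? cs (PySem.Int.floordiv N 2) with
  | none => 0  -- IndexError (excluded by Pre_)
  | some c =>
    if PySem.Int.mod N 2 = 0 then
      match PySem.List.pyGet? cs (PySem.Int.floordiv N 2 - 1) with
      | none => 0
      | some b =>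
        if b ≠ c then 0
        else
          2 + 2 * min (runCount c (PySem.List.slice cs none (some (PySem.Int.floordiv N 2 - 1))).reverse)
                      (runCount c (PySem.List.slice cs (some (PySem.Int.floordiv N 2 + 1)) none))
    else
      1 + 2 * min (runCount c (PySem.List.slice cs none (some (PySem.Int.floordiv N 2))).reverse)
                  (runCount c (PySem.List.slice cs (some (PySem.Int.floordiv N 2 + 1)) none))

def center_length_alt (s : String) : Int := centerB s.toList s.toList.length

-- ===== PRECONDITION & SPEC =====
-- Pre_ excludes only the empty string, on which A raises IndexError (s[0] with len 0).
def Pre_center_length (s : String) : Prop := s ≠ ""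
instance (s : String) : Decidable (Pre_center_length s) := by unfold Pre_center_length; infer_instance
def pvWitness_center_length : String := "abcba"

def Spec_center_length (s : String) (out : Int) : Prop := out = center_length_alt s
instance (s : String) (out : Int) : Decidable (Spec_center_length s out) := by unfold Spec_center_length; infer_instance

-- ===== CLAIM (what is proved, stated in full; the proofs are below) =====
def Claim_equal_center_length : Prop := ∀ (s : String), Dom_center_length s → Pre_center_length s → Spec_center_length s (center_length s)

-- ===== LEMMAS AND PROOFS =====

theorem runCount_nonneg (c : Char) (t : List Char) : 0 ≤ runCount c t := by
  induction t with
  | nil => simp [runCount]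
  | cons x xs ih => simp only [runCount]; split <;> omega

-- A's loop computes length + 2·min(leftward run from index li, rightward run from index ri),
-- provided the suffix from ri is strictly longer than the prefix up to li (true at both call sites).
theorem aLoop_spec (cs : List Char) (c : Char) :
    ∀ (k : Nat) (li ri len : Int), k = (li + 1).toNat → 0 ≤ ri → li < (cs.length : Int) - ri →
    aLoop cs c k li ri len
      = len + 2 * min (runCount c ((cs.take (li + 1).toNat).reverse)) (runCount c (cs.drop ri.toNat)) := by
  intro k
  induction k with
  | zero =>
    intro li ri len hk _ _
    have : (li + 1).toNat = 0 := hk.symm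
    simp only [aLoop, this, List.take_zero, List.reverse_nil, runCount]
    have := runCount_nonneg c (cs.drop ri.toNat)
    omega
  | succ n ih =>
    intro li ri len hk hri h
    have hli : 0 ≤ li := by omega
    have hlilen : li.toNat < cs.length := by omega
    have hrilen : ri.toNat < cs.length := by omega
    have hgl : PySem.List.pyGet? cs li = some cs[li.toNat] :=
      PySem.List.pyGet?_eq_some_getElem cs hli (by omega)
    have hgr : PySem.List.pyGet? cs ri = some cs[ri.toNat] :=
      PySem.List.pyGet?_eq_some_getElem cs hri (by omega)
    have htake : (li + 1).toNat = li.toNat + 1 := by omega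
    have htk : cs.take (li.toNat + 1) = cs.take li.toNat ++ [cs[li.toNat]] := by
      rw [List.take_succ]; simp [List.getElem?_eq_getElem hlilen]
    have hdr : cs.drop ri.toNat = cs[ri.toNat] :: cs.drop (ri.toNat + 1) :=
      List.drop_eq_getElem_cons hrilen
    by_cases hL : cs[li.toNat] = c
    · by_cases hR : cs[ri.toNat] = c
      · -- both match: one more iteration
        have hrec := ih (li - 1) (ri + 1) (len + 2) (by omega) (by omega) (by omega)
        rw [aLoop, if_pos ⟨hli, by rw [hgl, hL], by rw [hgr, hR]⟩, hrec]
        have h1 : (li - 1 + 1).toNat = li.toNat := by omega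
        have h2 : (ri + 1).toNat = ri.toNat + 1 := by omega
        rw [h1, h2, htake, htk, hdr]
        simp only [List.reverse_append, List.reverse_cons, List.reverse_nil, List.nil_append,
          List.singleton_append, runCount, hL, hR]
        simp only [ne_eq, not_true_eq_false, if_false]
        omega
      · -- right mismatch: loop exits, right run is 0
        rw [aLoop, if_neg (by rw [hgr]; simp [hR])]
        rw [htake, hdr]
        simp only [runCount, ne_eq, hR, not_false_eq_true, if_true]
        have := runCount_nonneg c ((cs.take (li.toNat + 1)).reverse)
        omega
    · -- left mismatch: loop exits, left run is 0
      rw [aLoop, if_neg (by rw [hgl]; simp [hL])]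
      rw [htake, htk]
      simp only [List.reverse_append, List.reverse_cons, List.reverse_nil, List.nil_append,
        List.singleton_append, runCount, ne_eq, hL, not_false_eq_true, if_true]
      have := runCount_nonneg c (cs.drop ri.toNat)
      omega

-- ===== VERDICT (by name: the statement is the Claim_ definition above) =====
theorem center_length_spec : Claim_equal_center_length := by
  intro s _ hpre
  unfold Spec_center_length center_length center_length_alt centerA centerB
  have hne : s.toList ≠ [] := by
    intro h; exact hpre (String.toList_eq_nil_iff.mp h)
  set cs := s.toList with hcs
  have hN : 1 ≤ cs.length := by
    have := List.length_pos_of_ne_nil hne; omega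
  have hfd : PySem.Int.floordiv (cs.length : Int) 2 = ((cs.length / 2 : Nat) : Int) := by
    exact_mod_cast PySem.Int.floordiv_natCast cs.length 2
  have hmd : PySem.Int.mod (cs.length : Int) 2 = ((cs.length % 2 : Nat) : Int) := by
    exact_mod_cast PySem.Int.mod_natCast cs.length 2
  set N := cs.length with hNdef
  have hmid : N / 2 < N := by omega
  have hgc : PySem.List.pyGet? cs ((N / 2 : Nat) : Int) = some cs[N / 2] := by
    rw [PySem.List.pyGet?_natCast, List.getElem?_eq_getElem hmid]
  by_cases hpar : N % 2 = 0
  · -- even; N ≥ 2 so N/2 ≥ 1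
    have h2 : 2 ≤ N := by omega
    have h1 : 1 ≤ N / 2 := by omega
    have hprev : ((N / 2 : Nat) : Int) - 1 = ((N / 2 - 1 : Nat) : Int) := by omega
    have hprevlt : N / 2 - 1 < N := by omega
    have hgb : PySem.List.pyGet? cs (((N / 2 : Nat) : Int) - 1) = some cs[N / 2 - 1] := by
      rw [hprev, PySem.List.pyGet?_natCast, List.getElem?_eq_getElem hprevlt]
    have hpz : ((N % 2 : Nat) : Int) = 0 := by exact_mod_cast hpar
    rw [hmd, hfd, hgc, hgb]
    dsimp only
    rw [if_pos hpz, if_pos hpz]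
    by_cases heq : cs[N / 2] = cs[N / 2 - 1]
    · rw [if_neg (not_not_intro heq), if_neg (not_not_intro heq.symm)]
      rw [aLoop_spec cs cs[N / 2] _ _ _ _ rfl (by omega) (by omega)]
      rw [PySem.List.slice_to cs (b := ((N / 2 : Nat) : Int) - 1) (by omega),
        PySem.List.slice_from cs (a := ((N / 2 : Nat) : Int) + 1) (by omega)]
      have e1 : (((N / 2 : Nat) : Int) - 2 + 1).toNat = N / 2 - 1 := by omega
      have e2 : (((N / 2 : Nat) : Int) - 1).toNat = N / 2 - 1 := by omega
      have e3 : (((N / 2 : Nat) : Int) + 1).toNat = N / 2 + 1 := by omega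
      rw [e1, e2, e3]
    · rw [if_pos heq, if_pos (fun hc => heq hc.symm)]
  · -- odd
    have hprevlt2 : (N : Int) - ((N / 2 : Nat) : Int) - 1 = ((N / 2 : Nat) : Int) := by omega
    have hpz : ¬ ((N % 2 : Nat) : Int) = 0 := by
      intro h; exact hpar (by exact_mod_cast h)
    rw [hmd, hfd, hgc]
    dsimp only
    rw [if_neg hpz, if_neg hpz]
    rw [aLoop_spec cs cs[N / 2] _ _ _ _ rfl (by omega) (by omega)]
    rw [PySem.List.slice_to cs (b := ((N / 2 : Nat) : Int)) (by omega),
      PySem.List.slice_from cs (a := ((N / 2 : Nat) : Int) + 1) (by omega)]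
    have e1 : (((N / 2 : Nat) : Int) - 1 + 1).toNat = N / 2 := by omega
    have e2 : ((N / 2 : Nat) : Int).toNat = N / 2 := by omega
    have e3 : (((N / 2 : Nat) : Int) + 1).toNat = N / 2 + 1 := by omega
    rw [e1, e2, e3]
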